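-- pv_equiv track=rewrite | github.com/hokoro/Algorithm | basic/ailendict.py | solution
-- ===== SOURCE A (Python) =====
-- def solution(spell, dic):
--     answer = 2
--     for d in dic:
--         temporary_spell = list(spell)
--         d_list = list(d)
--         for token in d_list:
--             if token in temporary_spell:
--                 temporary_spell.remove(token)
--         if len(temporary_spell) == 0:
--             answer = 1
--             break
--     return answer
-- ===== SOURCE B (Python) =====
-- def solution(spell, dic):
--     sa = sorted(spell)
--     for d in dic:
--         sd = sorted(d)
--         i = 0
--         j = 0
--         while i < len(sa) and j < len(sd):
--             if sd[j] == sa[i]: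
--                 i += 1
--             j += 1
--         if i == len(sa):
--             return 1
--     return 2
-- ===== Notes on version B (the rewrite author's own statement) =====
-- stated objective: faster
-- what changed: Replaces A's per-word copy of spell with repeated linear membership tests and list.remove by sorting spell once and each word once, then a two-pointer ordered merge deciding multiset containment.
import Mathlib
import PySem

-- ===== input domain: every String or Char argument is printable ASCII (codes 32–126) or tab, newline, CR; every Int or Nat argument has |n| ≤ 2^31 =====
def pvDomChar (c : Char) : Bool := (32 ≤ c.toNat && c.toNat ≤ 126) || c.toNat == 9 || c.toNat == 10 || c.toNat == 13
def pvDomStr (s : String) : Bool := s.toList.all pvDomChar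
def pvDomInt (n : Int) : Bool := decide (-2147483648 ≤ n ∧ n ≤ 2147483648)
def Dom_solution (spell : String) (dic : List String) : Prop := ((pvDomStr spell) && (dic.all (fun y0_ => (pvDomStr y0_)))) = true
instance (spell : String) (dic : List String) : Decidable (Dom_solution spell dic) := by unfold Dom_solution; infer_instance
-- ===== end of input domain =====

-- B replaces A's per-word membership-scan-and-remove pass by sort-once plus a two-pointer ordered merge (faster only if a timing run confirms; see claim).

-- ===== PORT A =====
-- inner 'for token in d_list: if token in temporary_spell: temporary_spell.remove(token)'
def solutionInner (ts : List Char) (d : List Char) : List Char :=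
  d.foldl (fun ts tok => if tok ∈ ts then ts.erase tok else ts) ts

-- 'for d in dic: …; answer = 1; break' as early-exit recursion
def solutionLoopA (spell : String) : List String → Int
  | [] => 2
  | d :: rest =>
    if (solutionInner spell.toList d.toList).length = 0 then 1 else solutionLoopA spell rest

def solution (spell : String) (dic : List String) : Int :=
  solutionLoopA spell dic

-- ===== PORT B =====
-- the while loop: i runs over sa (first list), j over sd (second list)
def mergeConsume : List Char → List Char → Bool
  | [], _ => true
  | _ :: _, [] => false
  | a :: as, b :: bs => if b = a then mergeConsume as bs else mergeConsume (a :: as) bs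

def solutionLoopB (sa : List Char) : List String → Int
  | [] => 2
  | d :: rest =>
    if mergeConsume sa (PySem.List.sorted d.toList (fun c => c) false) then 1
    else solutionLoopB sa rest

def solution_alt (spell : String) (dic : List String) : Int :=
  solutionLoopB (PySem.List.sorted spell.toList (fun c => c) false) dic

-- ===== PRECONDITION & SPEC =====
def Spec_solution (spell : String) (dic : List String) (out : Int) : Prop := out = solution_alt spell dic
instance (spell : String) (dic : List String) (out : Int) : Decidable (Spec_solution spell dic out) := by unfold Spec_solution; infer_instance

-- ===== CLAIM (what is proved, stated in full; the proofs are below) =====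
def Claim_equal_solution : Prop := ∀ (spell : String) (dic : List String), Dom_solution spell dic → Spec_solution spell dic (solution spell dic)

-- ===== LEMMAS AND PROOFS =====

-- A's inner loop is list difference: erasing a non-member is a no-op
theorem solutionInner_eq_diff (ts d : List Char) : solutionInner ts d = ts.diff d := by
  rw [List.diff_eq_foldl, solutionInner]
  induction d generalizing ts with
  | nil => rfl
  | cons x xs ih =>
    simp only [List.foldl_cons]
    by_cases h : x ∈ ts
    · simp [h, ih]
    · simp [h, List.erase_of_not_mem h, ih]

-- the greedy two-pointer merge decides the sublist relation
theorem mergeConsume_iff_sublist (as bs : List Char) :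
    mergeConsume as bs = true ↔ as.Sublist bs := by
  induction bs generalizing as with
  | nil => cases as <;> simp [mergeConsume]
  | cons b bs ih =>
    cases as with
    | nil => simp [mergeConsume]
    | cons a as =>
      by_cases h : b = a
      · subst h
        simp [mergeConsume, ih, List.cons_sublist_cons]
      · simp only [mergeConsume, if_neg h, ih]
        constructor
        · exact fun hs => hs.cons b
        · intro hs
          cases hs with
          | cons _ hs' => exact hs'
          | cons₂ => exact absurd rfl h

-- diff empty ↔ subperm, via multisets
theorem diff_eq_nil_iff_subperm (l₁ l₂ : List Char) :
    l₁.diff l₂ = [] ↔ l₁.Subperm l₂ := by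
  rw [← Multiset.coe_le]
  constructor
  · intro h
    have : (l₁ : Multiset Char) - (l₂ : Multiset Char) = 0 := by
      rw [Multiset.coe_sub, h]; rfl
    exact tsub_eq_zero_iff_le.mp this
  · intro h
    have : (l₁ : Multiset Char) - (l₂ : Multiset Char) = 0 := tsub_eq_zero_iff_le.mpr h
    rw [Multiset.coe_sub] at this
    exact_mod_cast (Multiset.coe_eq_zero _).mp (by exact_mod_cast this)

-- subperm is invariant under sorting both sides, and between sorted lists equals sublist
theorem subperm_iff_sorted_sublist (l₁ l₂ : List Char) :
    l₁.Subperm l₂ ↔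
      (PySem.List.sorted l₁ (fun c => c) false).Sublist (PySem.List.sorted l₂ (fun c => c) false) := by
  have p1 : (PySem.List.sorted l₁ (fun c => c) false).Perm l₁ := PySem.List.sorted_perm ..
  have p2 : (PySem.List.sorted l₂ (fun c => c) false).Perm l₂ := PySem.List.sorted_perm ..
  constructor
  · intro h
    have hsp : (PySem.List.sorted l₁ (fun c => c) false).Subperm
        (PySem.List.sorted l₂ (fun c => c) false) :=
      (p2.subperm_left.mpr (p1.subperm_right.mpr h))
    exact List.sublist_of_subperm_of_pairwise hsp
      (PySem.List.sorted_pairwise l₁ (fun c => c))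
      (PySem.List.sorted_pairwise l₂ (fun c => c))
  · intro h
    exact p1.subperm_right.mp (p2.subperm_left.mp h.subperm)

-- per-word equivalence of the two tests
theorem word_test_eq (spell : String) (d : String) :
    ((solutionInner spell.toList d.toList).length = 0) ↔
      mergeConsume (PySem.List.sorted spell.toList (fun c => c) false)
        (PySem.List.sorted d.toList (fun c => c) false) = true := by
  rw [solutionInner_eq_diff, List.length_eq_zero_iff, diff_eq_nil_iff_subperm,
    subperm_iff_sorted_sublist, mergeConsume_iff_sublist]

theorem loops_eq (spell : String) (dic : List String) :
    solutionLoopA spell dic =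
      solutionLoopB (PySem.List.sorted spell.toList (fun c => c) false) dic := by
  induction dic with
  | nil => rfl
  | cons d rest ih =>
    simp only [solutionLoopA, solutionLoopB]
    by_cases h : (solutionInner spell.toList d.toList).length = 0
    · rw [if_pos h, if_pos ((word_test_eq spell d).mp h)]
    · rw [if_neg h, if_neg (fun hc => h ((word_test_eq spell d).mpr hc)), ih]

-- ===== VERDICT (by name: the statement is the Claim_ definition above) =====
theorem solution_spec : Claim_equal_solution := by
  intro spell dic _
  show solution spell dic = solution_alt spell dic
  exact loops_eq spell dic
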